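-- pv_equiv track=rewrite | github.com/soup1997/Algorithm | 프로그래머스/2/131127. 할인 행사/할인 행사.py | solution
-- ===== SOURCE A (Python) =====
-- def solution(want, number, discount):
--     answer = 0
--     wants = {want[i]: number[i] for i in range(len(want))}
--
--     for i in range(len(discount) - 9):
--         wants_copied = wants.copy()
--
--         for j in range(i, i + 10):
--             if discount[j] in wants_copied:
--                 wants_copied[discount[j]] -= 1
--
--         if all(count == 0 for count in wants_copied.values()): # sum(wants_copied.values() == 0의 반례, [1, -1, 0, 0, 0]
--             answer += 1
--
--     return answer
-- ===== SOURCE B (Python) =====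
-- def solution(want, number, discount):
--     wants = dict(zip(want, number))
--     n = len(discount)
--     if n < 10:
--         return 0
--     cnt = {}
--     for x in discount[:10]:
--         if x in wants:
--             cnt[x] = cnt.get(x, 0) + 1
--     target = len(wants)
--     matched = sum(1 for k in wants if cnt.get(k, 0) == wants[k])
--     answer = 1 if matched == target else 0
--     for i in range(1, n - 9):
--         out = discount[i - 1]
--         if out in wants:
--             if cnt.get(out, 0) == wants[out]:
--                 matched -= 1
--             cnt[out] = cnt.get(out, 0) - 1
--             if cnt.get(out, 0) == wants[out]:
--                 matched += 1
--         inc = discount[i + 9]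
--         if inc in wants:
--             if cnt.get(inc, 0) == wants[inc]:
--                 matched -= 1
--             cnt[inc] = cnt.get(inc, 0) + 1
--             if cnt.get(inc, 0) == wants[inc]:
--                 matched += 1
--         if matched == target:
--             answer += 1
--     return answer
-- ===== Notes on version B (the rewrite author's own statement) =====
-- stated objective: faster
-- what changed: A re-counts every length-10 window from scratch (dict copy, 10 decrements and a full all-zero scan per window); B slides the window once, maintaining a counter of wanted items and a 'matched' tally updated only at the outgoing/incoming element, adding 1 whenever matched equals the number of distinct wanted keys.
import Mathlib
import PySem

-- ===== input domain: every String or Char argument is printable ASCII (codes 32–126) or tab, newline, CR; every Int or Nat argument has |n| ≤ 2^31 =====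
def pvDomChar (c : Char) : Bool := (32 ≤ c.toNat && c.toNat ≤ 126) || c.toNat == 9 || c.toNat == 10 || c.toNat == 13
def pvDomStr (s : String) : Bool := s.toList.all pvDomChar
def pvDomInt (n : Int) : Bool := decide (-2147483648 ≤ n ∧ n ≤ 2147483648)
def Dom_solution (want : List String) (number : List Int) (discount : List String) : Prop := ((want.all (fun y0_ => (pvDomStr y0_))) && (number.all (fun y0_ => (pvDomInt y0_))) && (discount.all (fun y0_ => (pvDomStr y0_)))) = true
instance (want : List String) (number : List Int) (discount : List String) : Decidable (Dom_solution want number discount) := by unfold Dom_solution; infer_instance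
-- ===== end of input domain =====

-- B replaces A's per-window dict copy + re-count by a single sliding-window pass maintaining a
-- counter of wanted items and a 'matched' tally; objective: faster.

-- ===== PORT A =====
-- body of A's inner decrement loop ('if discount[j] in wants_copied: wants_copied[discount[j]] -= 1')
def pvDecA (d : PySem.Dict String Int) (x : String) : PySem.Dict String Int :=
  if d.contains x then d.modify x 0 (· - 1) else d

def solution (want : List String) (number : List Int) (discount : List String) : Int :=
  let wants : PySem.Dict String Int :=
    (PySem.List.pyRange 0 (PySem.List.len want) 1).foldl
      (fun d i => d.insert (PySem.List.pyGetD want i "") (PySem.List.pyGetD number i 0))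
      PySem.Dict.empty
  (PySem.List.pyRange 0 (PySem.List.len discount - 9) 1).foldl
    (fun answer i =>
      let wc : PySem.Dict String Int :=
        (PySem.List.pyRange i (i + 10) 1).foldl
          (fun d j => pvDecA d (PySem.List.pyGetD discount j "")) wants
      if wc.values.all (fun c => c == 0) then answer + 1 else answer)
    0

-- ===== PORT B =====
-- body of B's sliding loop (state: counter of wanted items in the window, matched tally, answer)
def pvStepB (wants : PySem.Dict String Int) (discount : List String)
    (s : PySem.Dict String Int × Int × Int) (i : Int) :
    PySem.Dict String Int × Int × Int :=
  let out := PySem.List.pyGetD discount (i - 1) ""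
  let s1 : PySem.Dict String Int × Int :=
    if wants.contains out then
      let m1 := if s.1.getD out 0 == wants.getD out 0 then s.2.1 - 1 else s.2.1
      let c1 := s.1.insert out (s.1.getD out 0 - 1)
      (c1, if c1.getD out 0 == wants.getD out 0 then m1 + 1 else m1)
    else (s.1, s.2.1)
  let inc := PySem.List.pyGetD discount (i + 9) ""
  let s2 : PySem.Dict String Int × Int :=
    if wants.contains inc then
      let m1 := if s1.1.getD inc 0 == wants.getD inc 0 then s1.2 - 1 else s1.2
      let c1 := s1.1.insert inc (s1.1.getD inc 0 + 1)
      (c1, if c1.getD inc 0 == wants.getD inc 0 then m1 + 1 else m1)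
    else s1
  (s2.1, s2.2, if s2.2 == ((wants.size : Nat) : Int) then s.2.2 + 1 else s.2.2)

def solution_alt (want : List String) (number : List Int) (discount : List String) : Int :=
  let wants : PySem.Dict String Int :=
    (want.zip number).foldl (fun d p => d.insert p.1 p.2) PySem.Dict.empty
  let n : Int := PySem.List.len discount
  if n < 10 then 0
  else
    let cnt : PySem.Dict String Int :=
      (PySem.List.slice discount none (some 10)).foldl
        (fun d x => if wants.contains x then d.insert x (d.getD x 0 + 1) else d)
        PySem.Dict.empty
    let matched : Int :=
      wants.keys.foldl (fun m k => if cnt.getD k 0 == wants.getD k 0 then m + 1 else m) 0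
    let answer : Int := if matched == ((wants.size : Nat) : Int) then 1 else 0
    ((PySem.List.pyRange 1 (n - 9) 1).foldl (pvStepB wants discount) (cnt, matched, answer)).2.2

-- ===== PRECONDITION & SPEC =====
-- Pre_ excludes inputs with len(number) < len(want), on which A raises IndexError building the dict.
def Pre_solution (want : List String) (number : List Int) (discount : List String) : Prop :=
  want.length ≤ number.length
instance (want : List String) (number : List Int) (discount : List String) : Decidable (Pre_solution want number discount) := by unfold Pre_solution; infer_instance
def pvWitness_solution : List String × List Int × List String :=
  (["a"], [1], ["a", "a", "b", "a", "a", "a", "b", "b", "a", "b"])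

def Spec_solution (want : List String) (number : List Int) (discount : List String) (out : Int) : Prop := out = solution_alt want number discount
instance (want : List String) (number : List Int) (discount : List String) (out : Int) : Decidable (Spec_solution want number discount out) := by unfold Spec_solution; infer_instance

-- ===== CLAIM (what is proved, stated in full; the proofs are below) =====
def Claim_equal_solution : Prop := ∀ (want : List String) (number : List Int) (discount : List String), Dom_solution want number discount → Pre_solution want number discount → Spec_solution want number discount (solution want number discount)

-- ===== LEMMAS AND PROOFS =====

-- the length-10 window starting at u
def pvWin (discount : List String) (u : Nat) : List String := (discount.drop u).take 10
-- "window l fulfils the whole demand w"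
def pvOkL (w : PySem.Dict String Int) (l : List String) : Bool :=
  w.items.all (fun p => ((l.count p.1 : Int) == p.2))
-- number of demand entries fulfilled by window l
def pvM (w : PySem.Dict String Int) (l : List String) : Nat :=
  w.items.countP (fun p => ((l.count p.1 : Int) == p.2))

-- the two ports build the same demand dict
theorem pv_wants_eq (want : List String) (number : List Int) (h : want.length ≤ number.length) :
    (PySem.List.pyRange 0 ((want.length : Int)) 1).foldl
        (fun d i => d.insert (PySem.List.pyGetD want i "") (PySem.List.pyGetD number i 0))
        PySem.Dict.empty
    = (want.zip number).foldl (fun d p => d.insert p.1 p.2) PySem.Dict.empty := by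
  have hmap : (List.range want.length).map
      (fun k => (want.getD k "", number.getD k 0)) = want.zip number := by
    apply List.ext_getElem
    · simp [Nat.min_eq_left h]
    · intro i h1 h2
      have hi : i < want.length := by simpa using h1
      simp [List.getElem_zip, List.getElem?_eq_getElem (by omega : i < want.length),
        List.getElem?_eq_getElem (by omega : i < number.length)]
  rw [PySem.List.pyRange_zero_nat, List.foldl_map]
  rw [← hmap, List.foldl_map]
  simp

-- A's inner decrement loop preserves the key list
theorem pv_dec_keys (l : List String) : ∀ (d : PySem.Dict String Int),
    (l.foldl pvDecA d).keys = d.keys := by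
  induction l with
  | nil => intro d; rfl
  | cons x t ih =>
    intro d
    simp only [List.foldl_cons, pvDecA]
    by_cases hc : d.contains x
    · rw [if_pos hc, ih, PySem.Dict.keys_modify, PySem.Dict.keys_insert_of_contains _ _ hc]
    · rw [if_neg hc, ih]

-- final value at a key after A's inner decrement loop
theorem pv_dec_getD (l : List String) : ∀ (d : PySem.Dict String Int) (k : String),
    (l.foldl pvDecA d).getD k 0
      = d.getD k 0 - (if d.contains k then (l.count k : Int) else 0) := by
  induction l with
  | nil => intro d k; simp
  | cons x t ih =>
    intro d k
    simp only [List.foldl_cons, pvDecA]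
    by_cases hc : d.contains x
    · rw [if_pos hc, ih]
      have hck : (d.modify x 0 (· - 1)).contains k = d.contains k := by
        rw [PySem.Dict.contains_eq_decide_mem_keys, PySem.Dict.contains_eq_decide_mem_keys,
          PySem.Dict.keys_modify, PySem.Dict.keys_insert_of_contains _ _ hc]
      rw [hck, PySem.Dict.getD_modify]
      by_cases hk : k = x
      · subst hk
        rw [if_pos rfl, List.count_cons_self]
        simp only [hc, if_true]
        push_cast; ring
      · rw [if_neg hk, List.count_cons_of_ne (by simpa using Ne.symm hk)]
    · rw [if_neg hc, ih]
      by_cases hk : k = x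
      · subst hk; simp [hc]
      · rw [List.count_cons_of_ne (by simpa using Ne.symm hk)]

-- A's all-zero test after the decrement loop says: window l fulfils the whole demand
theorem pv_allzero (w : PySem.Dict String Int) (hnd : w.keys.Nodup) (l : List String) :
    ((l.foldl pvDecA w).values.all (fun c => c == 0)) = pvOkL w l := by
  have hkeys := pv_dec_keys l w
  have hnd' : (l.foldl pvDecA w).keys.Nodup := hkeys ▸ hnd
  rw [pvOkL, PySem.Dict.items_eq_map_keys w hnd 0, PySem.Dict.values,
    PySem.Dict.items_eq_map_keys _ hnd' 0, hkeys]
  simp only [List.all_map]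
  rw [Bool.eq_iff_iff]
  simp only [List.all_eq_true]
  apply forall_congr'
  intro k
  apply imp_congr_right
  intro hk
  have hck : w.contains k = true := (PySem.Dict.contains_iff_mem_keys w k).2 hk
  simp only [Function.comp_apply, pv_dec_getD, hck, if_true, beq_iff_eq]
  omega

-- A's inner index loop is a fold over the window
theorem pv_foldA (discount : List String) : ∀ (c : Nat) (j : Int), 0 ≤ j →
    j + c ≤ (discount.length : Int) → ∀ (d : PySem.Dict String Int),
    (PySem.List.pyRange j (j + (c : Int)) 1).foldl
        (fun d t => pvDecA d (PySem.List.pyGetD discount t "")) d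
      = ((discount.drop j.toNat).take c).foldl pvDecA d := by
  intro c
  induction c with
  | zero =>
    intro j hj hjc d
    rw [PySem.List.pyRange_one_eq_nil (by omega)]
    simp
  | succ c ih =>
    intro j hj hjc d
    have hjlt : j < discount.length := by push_cast at hjc ⊢; omega
    have harg : j + ((c + 1 : Nat) : Int) = (j + 1) + (c : Int) := by push_cast; ring
    rw [harg, PySem.List.pyRange_one_cons (by omega), List.foldl_cons]
    rw [PySem.List.pyGetD_eq_getElem discount "" (by omega) (by omega : j < (discount.length : Int))]
    rw [List.drop_eq_getElem_cons (by omega : j.toNat < discount.length), List.take_succ_cons,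
      List.foldl_cons]
    have := ih (j + 1) (by omega) (by push_cast at hjc ⊢; omega)
      (pvDecA d discount[j.toNat])
    rw [show (j + 1).toNat = j.toNat + 1 from by omega] at this
    exact this

-- countP over pairs with distinct keys, when the predicate changes only at key k0
theorem pv_countP_change (items : List (String × Int)) (k0 : String) (v0 : Int)
    (p q : String × Int → Bool) :
    ∀ (_ : (items.map Prod.fst).Nodup) (_ : (k0, v0) ∈ items)
      (_ : ∀ r : String × Int, r.1 ≠ k0 → p r = q r),
    (items.countP q : Int) = items.countP p
      - (if p (k0, v0) then 1 else 0) + (if q (k0, v0) then 1 else 0) := by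
  induction items with
  | nil => intro _ hmem; simp at hmem
  | cons r t ih =>
    intro hnd hmem hagree
    have hndt : (t.map Prod.fst).Nodup := (List.nodup_cons.1 hnd).2
    have hr0 : r.1 ∉ t.map Prod.fst := (List.nodup_cons.1 hnd).1
    rcases List.mem_cons.1 hmem with heq | hmemt
    · subst heq
      have ht : t.countP p = t.countP q := by
        apply List.countP_congr
        intro s hs
        have : s.1 ≠ k0 := by
          intro h
          exact hr0 (h ▸ (List.mem_map.2 ⟨s, hs, rfl⟩))
        simp [hagree s this]
      rw [List.countP_cons, List.countP_cons, ht]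
      push_cast
      split_ifs <;> omega
    · have hrk : r.1 ≠ k0 := by
        intro h
        exact hr0 (h ▸ (List.mem_map.2 ⟨(k0, v0), hmemt, rfl⟩))
      have := ih hndt hmemt hagree
      rw [List.countP_cons, List.countP_cons, hagree r hrk]
      push_cast
      push_cast at this
      split_ifs at this ⊢ <;> omega

-- matched == target  iff  the window fulfils the whole demand
theorem pv_m_target (w : PySem.Dict String Int) (l : List String) :
    (((pvM w l : Int)) == ((w.size : Nat) : Int)) = pvOkL w l := by
  rw [Bool.eq_iff_iff, beq_iff_eq, pvM, pvOkL, Int.natCast_inj]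
  rw [List.all_eq_true]
  exact ⟨fun h => List.countP_eq_length.1 h, fun h => List.countP_eq_length.2 h⟩

-- one sliding update at key x (the element leaving or entering the window), x wanted
theorem pv_phase (w : PySem.Dict String Int) (hnd : w.keys.Nodup)
    (d d1 : PySem.Dict String Int) (m : Int) (x : String) (l l' : List String)
    (hd : ∀ k ∈ w.keys, d.getD k 0 = (l.count k : Int))
    (hm : m = (pvM w l : Int))
    (hc : ∀ k, k ≠ x → l'.count k = l.count k)
    (hd1 : ∀ k, d1.getD k 0 = if k = x then (l'.count x : Int) else d.getD k 0)
    (hwx : w.contains x = true) :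
    (∀ k ∈ w.keys, d1.getD k 0 = (l'.count k : Int))
    ∧ ((if d1.getD x 0 == w.getD x 0 then (if d.getD x 0 == w.getD x 0 then m - 1 else m) + 1
        else (if d.getD x 0 == w.getD x 0 then m - 1 else m)) = (pvM w l' : Int)) := by
  have hxk : x ∈ w.keys := (PySem.Dict.contains_iff_mem_keys w x).1 hwx
  have hxitems : (x, w.getD x 0) ∈ w.items := by
    rw [PySem.Dict.items_eq_map_keys w hnd 0]
    exact List.mem_map.2 ⟨x, hxk, rfl⟩
  have hndf : (w.items.map Prod.fst).Nodup := hnd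
  constructor
  · intro k hk
    rw [hd1]
    by_cases hkx : k = x
    · subst hkx; simp
    · rw [if_neg hkx, hd k hk, hc k hkx]
  · have hch := pv_countP_change w.items x (w.getD x 0)
      (fun p => ((l.count p.1 : Int) == p.2)) (fun p => ((l'.count p.1 : Int) == p.2))
      hndf hxitems (by intro r hr; simp only []; rw [hc r.1 hr])
    rw [hd1, if_pos rfl, hd x hxk, hm]
    rw [pvM, pvM] at *
    simp only at hch
    rw [hch]
    split_ifs <;> omega

-- one sliding update at key x, x not wanted: nothing changes
theorem pv_phase_skip (w : PySem.Dict String Int) (hnd : w.keys.Nodup)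
    (d : PySem.Dict String Int) (x : String) (l l' : List String)
    (hd : ∀ k ∈ w.keys, d.getD k 0 = (l.count k : Int))
    (hc : ∀ k, k ≠ x → l'.count k = l.count k)
    (hwx : w.contains x = false) :
    (∀ k ∈ w.keys, d.getD k 0 = (l'.count k : Int)) ∧ pvM w l' = pvM w l := by
  have hxk : x ∉ w.keys := by
    intro h
    rw [(PySem.Dict.contains_iff_mem_keys w x).2 h] at hwx
    simp at hwx
  have hkx : ∀ k ∈ w.keys, k ≠ x := fun k hk h => hxk (h ▸ hk)
  constructor
  · intro k hk
    rw [hd k hk, hc k (hkx k hk)]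
  · apply List.countP_congr
    intro r hr
    have hrk : r.1 ∈ w.keys := by
      rw [PySem.Dict.items_eq_map_keys w hnd 0] at hr
      rcases List.mem_map.1 hr with ⟨k, hk, he⟩
      rw [← he]; exact hk
    rw [hc r.1 (hkx r.1 hrk)]

-- sliding one step: the two half-windows
theorem pv_win_shift (discount : List String) (u : Nat) (h : u + 11 ≤ discount.length) :
    pvWin discount u = discount[u]'(by omega) :: ((discount.drop (u+1)).take 9)
    ∧ pvWin discount (u+1) = ((discount.drop (u+1)).take 9) ++ [discount[u+10]'(by omega)] := by
  constructor
  · rw [pvWin, List.drop_eq_getElem_cons (by omega : u < discount.length)]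
    rfl
  · rw [pvWin]
    have h9 : (discount.drop (u+1))[9]? = some (discount[u+10]'(by omega)) := by
      rw [List.getElem?_drop, List.getElem?_eq_getElem (by omega : u + 1 + 9 < discount.length)]
    show (discount.drop (u+1)).take (9+1) = _
    rw [List.take_succ, h9]
    rfl

-- one application of the loop body advances the window invariant by one
theorem pv_stepB (w : PySem.Dict String Int) (hnd : w.keys.Nodup) (discount : List String)
    (j : Int) (hj : 1 ≤ j) (hjW : j < (discount.length : Int) - 9)
    (d : PySem.Dict String Int) (mt a : Int)
    (hd : ∀ k ∈ w.keys, d.getD k 0 = ((pvWin discount (j - 1).toNat).count k : Int))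
    (hmt : mt = (pvM w (pvWin discount (j - 1).toNat) : Int)) :
    (∀ k ∈ w.keys, (pvStepB w discount (d, mt, a) j).1.getD k 0
        = ((pvWin discount ((j - 1).toNat + 1)).count k : Int))
    ∧ (pvStepB w discount (d, mt, a) j).2.1
        = (pvM w (pvWin discount ((j - 1).toNat + 1)) : Int)
    ∧ (pvStepB w discount (d, mt, a) j).2.2
        = (if pvOkL w (pvWin discount ((j - 1).toNat + 1)) then a + 1 else a) := by
  set u : Nat := (j - 1).toNat with hu
  have hu11 : u + 11 ≤ discount.length := by omega
  obtain ⟨hwin1, hwin2⟩ := pv_win_shift discount u hu11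
  set x0 : String := discount[u]'(by omega) with hx0
  set x1 : String := discount[u + 10]'(by omega) with hx1
  set mid : List String := (discount.drop (u+1)).take 9 with hmid
  have hout : PySem.List.pyGetD discount (j - 1) "" = x0 := by
    rw [PySem.List.pyGetD_eq_getElem discount "" (by omega) (by omega)]
  have hinc : PySem.List.pyGetD discount (j + 9) "" = x1 := by
    rw [PySem.List.pyGetD_eq_getElem discount "" (by omega) (by omega)]
    congr 1
    omega
  have hc0 : ∀ k, k ≠ x0 → mid.count k = (pvWin discount u).count k := by
    intro k hk
    rw [hwin1, List.count_cons_of_ne (by simpa using Ne.symm hk)]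
  have hcx0 : (pvWin discount u).count x0 = mid.count x0 + 1 := by
    rw [hwin1, List.count_cons_self]
  have hc1 : ∀ k, k ≠ x1 → (pvWin discount (u+1)).count k = mid.count k := by
    intro k hk
    rw [hwin2, List.count_append, List.count_singleton]
    simp [Ne.symm hk]
  have hcx1 : (pvWin discount (u+1)).count x1 = mid.count x1 + 1 := by
    rw [hwin2, List.count_append, List.count_singleton]
    simp
  have phase1 :
      (∀ k ∈ w.keys, (if w.contains x0 then d.insert x0 (d.getD x0 0 - 1) else d).getD k 0
          = (mid.count k : Int))
      ∧ (if w.contains x0 then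
           (if (d.insert x0 (d.getD x0 0 - 1)).getD x0 0 == w.getD x0 0 then
              (if d.getD x0 0 == w.getD x0 0 then mt - 1 else mt) + 1
            else (if d.getD x0 0 == w.getD x0 0 then mt - 1 else mt))
         else mt) = (pvM w mid : Int) := by
    by_cases hw0 : w.contains x0
    · have hd1 : ∀ k, (d.insert x0 (d.getD x0 0 - 1)).getD k 0
          = if k = x0 then (mid.count x0 : Int) else d.getD k 0 := by
        intro k
        rw [PySem.Dict.getD_insert]
        by_cases hk : k = x0
        · rw [if_pos hk, if_pos hk,
            hd x0 ((PySem.Dict.contains_iff_mem_keys w x0).1 hw0), hcx0]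
          push_cast; ring
        · rw [if_neg hk, if_neg hk]
      have hp := pv_phase w hnd d (d.insert x0 (d.getD x0 0 - 1)) mt x0
        (pvWin discount u) mid hd hmt hc0 hd1 hw0
      rw [if_pos hw0, if_pos hw0]
      exact hp
    · have hp := pv_phase_skip w hnd d x0 (pvWin discount u) mid hd hc0
        (by simpa using hw0)
      rw [if_neg hw0, if_neg hw0]
      exact ⟨hp.1, by rw [hmt, hp.2]⟩
  obtain ⟨hphase1d, hphase1m⟩ := phase1
  set dmid : PySem.Dict String Int := if w.contains x0 then d.insert x0 (d.getD x0 0 - 1) else d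
    with hdmid
  set mmid : Int := (if w.contains x0 then
           (if (d.insert x0 (d.getD x0 0 - 1)).getD x0 0 == w.getD x0 0 then
              (if d.getD x0 0 == w.getD x0 0 then mt - 1 else mt) + 1
            else (if d.getD x0 0 == w.getD x0 0 then mt - 1 else mt))
         else mt) with hmmid
  have phase2 :
      (∀ k ∈ w.keys, (if w.contains x1 then dmid.insert x1 (dmid.getD x1 0 + 1) else dmid).getD k 0
          = ((pvWin discount (u+1)).count k : Int))
      ∧ (if w.contains x1 then
           (if (dmid.insert x1 (dmid.getD x1 0 + 1)).getD x1 0 == w.getD x1 0 then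
              (if dmid.getD x1 0 == w.getD x1 0 then mmid - 1 else mmid) + 1
            else (if dmid.getD x1 0 == w.getD x1 0 then mmid - 1 else mmid))
         else mmid) = (pvM w (pvWin discount (u+1)) : Int) := by
    by_cases hw1 : w.contains x1
    · have hd1 : ∀ k, (dmid.insert x1 (dmid.getD x1 0 + 1)).getD k 0
          = if k = x1 then ((pvWin discount (u+1)).count x1 : Int) else dmid.getD k 0 := by
        intro k
        rw [PySem.Dict.getD_insert]
        by_cases hk : k = x1
        · rw [if_pos hk, if_pos hk,
            hphase1d x1 ((PySem.Dict.contains_iff_mem_keys w x1).1 hw1), hcx1]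
          push_cast; ring
        · rw [if_neg hk, if_neg hk]
      have hp := pv_phase w hnd dmid (dmid.insert x1 (dmid.getD x1 0 + 1)) mmid x1
        mid (pvWin discount (u+1)) hphase1d hphase1m
        (by intro k hk; exact hc1 k hk) hd1 hw1
      rw [if_pos hw1, if_pos hw1]
      exact hp
    · have hp := pv_phase_skip w hnd dmid x1 mid (pvWin discount (u+1)) hphase1d
        (by intro k hk; exact hc1 k hk) (by simpa using hw1)
      rw [if_neg hw1, if_neg hw1]
      exact ⟨hp.1, by rw [hp.2, hphase1m]⟩
  obtain ⟨hphase2d, hphase2m⟩ := phase2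
  have hred : pvStepB w discount (d, mt, a) j
      = ((if w.contains x1 then dmid.insert x1 (dmid.getD x1 0 + 1) else dmid),
         (if w.contains x1 then
           (if (dmid.insert x1 (dmid.getD x1 0 + 1)).getD x1 0 == w.getD x1 0 then
              (if dmid.getD x1 0 == w.getD x1 0 then mmid - 1 else mmid) + 1
            else (if dmid.getD x1 0 == w.getD x1 0 then mmid - 1 else mmid))
         else mmid),
         (if ((if w.contains x1 then
           (if (dmid.insert x1 (dmid.getD x1 0 + 1)).getD x1 0 == w.getD x1 0 then
              (if dmid.getD x1 0 == w.getD x1 0 then mmid - 1 else mmid) + 1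
            else (if dmid.getD x1 0 == w.getD x1 0 then mmid - 1 else mmid))
         else mmid) == ((w.size : Nat) : Int)) then a + 1 else a)) := by
    rw [pvStepB]
    simp only [hout, hinc, hdmid, hmmid]
    by_cases hw0 : w.contains x0 <;> by_cases hw1 : w.contains x1 <;>
      simp only [hw0, hw1, if_true, if_false, Bool.false_eq_true]
  rw [hred]
  refine ⟨hphase2d, hphase2m, ?_⟩
  rw [hphase2m, pv_m_target]

-- B's sliding loop, from window j-1 on: adds one per fulfilled later window
theorem pv_Bloop (w : PySem.Dict String Int) (hnd : w.keys.Nodup) (discount : List String) :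
    ∀ (m : Nat) (j : Int), 1 ≤ j → j + m = (discount.length : Int) - 9 →
    ∀ (d : PySem.Dict String Int) (mt a : Int),
    (∀ k ∈ w.keys, d.getD k 0 = ((pvWin discount (j - 1).toNat).count k : Int)) →
    mt = (pvM w (pvWin discount (j - 1).toNat) : Int) →
    ((PySem.List.pyRange j ((discount.length : Int) - 9) 1).foldl
        (pvStepB w discount) (d, mt, a)).2.2
      = a + (((List.range m).countP (fun t => pvOkL w (pvWin discount (j.toNat + t)))) : Int) := by
  intro m
  induction m with
  | zero =>
    intro j hj hjm d mt a hd hmt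
    rw [PySem.List.pyRange_one_eq_nil (by omega)]
    simp
  | succ m ih =>
    intro j hj hjm d mt a hd hmt
    have hjW : j < (discount.length : Int) - 9 := by omega
    rw [PySem.List.pyRange_one_cons hjW, List.foldl_cons]
    obtain ⟨h1, h2, h3⟩ := pv_stepB w hnd discount j hj hjW d mt a hd hmt
    have hidx : (j + 1 - 1).toNat = (j - 1).toNat + 1 := by omega
    have hih := ih (j + 1) (by omega) (by omega)
      (pvStepB w discount (d, mt, a) j).1
      (pvStepB w discount (d, mt, a) j).2.1
      (pvStepB w discount (d, mt, a) j).2.2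
      (by rw [hidx]; exact h1) (by rw [hidx]; exact h2)
    rw [hih, h3]
    have hj0 : j.toNat = (j - 1).toNat + 1 := by omega
    have hsh : ∀ t : Nat, (j - 1).toNat + 1 + (t + 1) = (j + 1).toNat + t := by intro t; omega
    rw [List.range_succ_eq_map, List.countP_cons, List.countP_map]
    simp only [Function.comp_def, Nat.succ_eq_add_one, Nat.add_zero, hj0, hsh]
    push_cast
    split_ifs <;> omega

-- A's outer loop counts the fulfilled windows
theorem pv_A_val (w : PySem.Dict String Int) (hnd : w.keys.Nodup) (discount : List String) :
    (PySem.List.pyRange 0 ((discount.length : Int) - 9) 1).foldl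
      (fun answer i =>
        if ((PySem.List.pyRange i (i + 10) 1).foldl
              (fun d j => pvDecA d (PySem.List.pyGetD discount j "")) w).values.all
            (fun c => c == 0)
        then answer + 1 else answer) 0
    = ((((List.range ((discount.length : Int) - 9).toNat)).countP
        (fun k => pvOkL w (pvWin discount k))) : Int) := by
  rw [PySem.List.foldl_congr_mem _ _
    (fun answer i => if pvOkL w (pvWin discount i.toNat) then answer + 1 else answer) _
    (by
      intro acc i hi
      obtain ⟨h0, hlt⟩ := (PySem.List.mem_pyRange_one).1 hi
      have hfold := pv_foldA discount 10 i h0 (by push_cast; omega) w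
      norm_num at hfold
      simp only [hfold, pv_allzero w hnd, pvWin]
      rfl)]
  have hadd := PySem.List.foldl_if_add_one
    (fun i : Int => pvOkL w (pvWin discount i.toNat))
    (PySem.List.pyRange 0 ((discount.length : Int) - 9) 1) 0
  simp only at hadd
  rw [hadd]
  rw [PySem.List.pyRange_zero, List.countP_map]
  norm_num
  apply List.countP_congr
  intro k _
  simp

-- B's whole else-branch counts the fulfilled windows
theorem pv_B_val (w cnt : PySem.Dict String Int) (discount : List String)
    (hnd : w.keys.Nodup) (hN : ¬ ((discount.length : Int) < 10))
    (hcnt : cnt = (PySem.List.slice discount none (some 10)).foldl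
        (fun d x => if w.contains x then d.insert x (d.getD x 0 + 1) else d) PySem.Dict.empty) :
    ((PySem.List.pyRange 1 ((discount.length : Int) - 9) 1).foldl (pvStepB w discount)
      (cnt,
       w.keys.foldl (fun m k => if cnt.getD k 0 == w.getD k 0 then m + 1 else m) 0,
       if (w.keys.foldl (fun m k => if cnt.getD k 0 == w.getD k 0 then m + 1 else m) 0)
           == ((w.size : Nat) : Int) then 1 else 0)).2.2
    = ((List.range ((discount.length : Int) - 9).toNat).countP
        (fun k => pvOkL w (pvWin discount k)) : Int) := by
  have hsl : PySem.List.slice discount none (some (10 : Int)) = discount.take 10 := by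
    simp [pysem]
  have hcnt' : ∀ k, w.contains k = true → cnt.getD k 0 = ((pvWin discount 0).count k : Int) := by
    intro k hk
    rw [hcnt, hsl]
    have hfil := PySem.List.foldl_if_eq_foldl_filter (fun x => w.contains x)
      (fun (d : PySem.Dict String Int) x => d.insert x (d.getD x 0 + 1)) (discount.take 10)
      PySem.Dict.empty
    simp only at hfil
    rw [hfil, PySem.Dict.getD_foldl_insert_add_one, List.count_filter hk]
    simp [pvWin]
  have hmatched : (w.keys.foldl (fun m k => if cnt.getD k 0 == w.getD k 0 then m + 1 else m) 0)
      = (pvM w (pvWin discount 0) : Int) := by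
    have hadd := PySem.List.foldl_if_add_one (fun k => cnt.getD k 0 == w.getD k 0) w.keys 0
    simp only at hadd
    have hcg : List.countP (fun k => cnt.getD k 0 == w.getD k 0) w.keys
        = List.countP
            ((fun p : String × Int => ((List.count p.1 (pvWin discount 0) : Int) == p.2))
              ∘ fun k => (k, w.getD k 0)) w.keys := by
      apply List.countP_congr
      intro k hk
      simp only [Function.comp_apply]
      rw [hcnt' k ((PySem.Dict.contains_iff_mem_keys w k).2 hk)]
    rw [hadd, pvM, PySem.Dict.items_eq_map_keys w hnd 0, List.countP_map, ← hcg]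
    omega
  have h10 : ((1 : Int) - 1).toNat = 0 := by norm_num
  have hbl := pv_Bloop w hnd discount (((discount.length : Int) - 9).toNat - 1) 1
    (by omega) (by omega) cnt
    (w.keys.foldl (fun m k => if cnt.getD k 0 == w.getD k 0 then m + 1 else m) 0)
    (if (w.keys.foldl (fun m k => if cnt.getD k 0 == w.getD k 0 then m + 1 else m) 0)
        == ((w.size : Nat) : Int) then 1 else 0)
    (by
      intro k hk
      rw [h10]
      exact hcnt' k ((PySem.Dict.contains_iff_mem_keys w k).2 hk))
    (by rw [h10]; exact hmatched)
  rw [hbl, hmatched, pv_m_target]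
  rw [show ((discount.length : Int) - 9).toNat = (((discount.length : Int) - 9).toNat - 1) + 1
      from by omega,
    List.range_succ_eq_map, List.countP_cons, List.countP_map]
  have hcc : ∀ t : Nat, (1 : Int).toNat + t = t + 1 := by intro t; omega
  simp only [Function.comp_def, Nat.succ_eq_add_one, hcc]
  push_cast
  split_ifs <;> omega

-- ===== VERDICT (by name: the statement is the Claim_ definition above) =====
theorem solution_spec : Claim_equal_solution := by
  intro want number discount hdom hpre
  unfold Spec_solution
  unfold Pre_solution at hpre
  simp only [solution, solution_alt, PySem.List.len_eq]
  simp only [pv_wants_eq want number hpre]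
  set w : PySem.Dict String Int :=
    (want.zip number).foldl (fun d p => d.insert p.1 p.2) PySem.Dict.empty with hw
  have hnd : w.keys.Nodup := by
    rw [hw]
    exact PySem.Dict.nodup_keys_foldl_insert_key (want.zip number) Prod.fst
      (fun _ p => p.2) PySem.Dict.empty (by simp)
  rw [pv_A_val w hnd discount]
  by_cases hlt : (discount.length : Int) < 10
  · rw [if_pos hlt]
    simp [show ((discount.length : Int) - 9).toNat = 0 from by omega]
  · rw [if_neg hlt]
    exact (pv_B_val w _ discount hnd hlt rfl).symm
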